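-- pv_equiv track=rewrite | github.com/doocs/leetcode | solution/3700-3799/3792.Sum of Increasing Product Blocks/Solution.py | sumOfBlocks
-- ===== SOURCE A (Python) =====
-- def sumOfBlocks(n: int) -> int:
--     ans = 0
--     mod = 10**9 + 7
--     k = 1
--     for i in range(1, n + 1):
--         x = 1
--         for j in range(k, k + i):
--             x = (x * j) % mod
--         ans = (ans + x) % mod
--         k += i
--     return ans
-- ===== SOURCE B (Python) =====
-- def sumOfBlocks(n: int) -> int:
--     if n <= 0:
--         return 0
--     mod = 10**9 + 7
--     ans = 0
--     x = 1
--     size = 1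
--     rem = 1
--     for val in range(1, n * (n + 1) // 2 + 1):
--         x = x * val % mod
--         rem -= 1
--         if rem == 0:
--             ans = (ans + x) % mod
--             x = 1
--             size += 1
--             rem = size
--     return ans
-- ===== Notes on version B (the rewrite author's own statement) =====
-- stated objective: alternative
-- what changed: Replaces A's nested for-loops (outer over block indices, inner rebuilding each block's range) with one flat while-loop that walks the consecutive integers once, tracking a running product, a countdown of remaining items in the current block, and a completed-block counter.
import Mathlib
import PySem

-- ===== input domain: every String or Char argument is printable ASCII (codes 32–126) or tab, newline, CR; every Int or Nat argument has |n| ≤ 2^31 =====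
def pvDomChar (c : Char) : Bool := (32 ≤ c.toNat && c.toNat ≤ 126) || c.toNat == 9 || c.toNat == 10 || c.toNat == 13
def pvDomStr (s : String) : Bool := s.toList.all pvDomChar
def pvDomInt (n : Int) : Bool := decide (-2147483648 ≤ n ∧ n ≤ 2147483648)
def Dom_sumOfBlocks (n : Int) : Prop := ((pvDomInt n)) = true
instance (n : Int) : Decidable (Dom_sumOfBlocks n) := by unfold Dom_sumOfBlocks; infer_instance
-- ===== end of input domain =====

-- B replaces A's nested loops by one flat sweep over all n*(n+1)//2 consecutive integers,
-- tracking block boundaries with a countdown (alternative decomposition, same asymptotic cost).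

-- ===== PORT A =====
-- A: outer loop i = 1..n keeping (ans, k); inner loop j = k..k+i-1 building the block product.
def sumOfBlocks (n : Int) : Int :=
  ((PySem.List.pyRange 1 (n + 1) 1).foldl
    (fun (s : Int × Int) i =>
      let x := (PySem.List.pyRange s.2 (s.2 + i) 1).foldl
        (fun x j => PySem.Int.mod (x * j) 1000000007) 1
      (PySem.Int.mod (s.1 + x) 1000000007, s.2 + i))
    (0, 1)).1

-- ===== PORT B =====
-- B's single for-loop body; state (ans, x, size, rem), rem counts down inside the block.
def sumOfBlocksStep (st : Int × Int × Int × Int) (val : Int) : Int × Int × Int × Int :=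
  let x' := PySem.Int.mod (st.2.1 * val) 1000000007
  let rem' := st.2.2.2 - 1
  if rem' = 0 then
    (PySem.Int.mod (st.1 + x') 1000000007, 1, st.2.2.1 + 1, st.2.2.1 + 1)
  else
    (st.1, x', st.2.2.1, rem')

def sumOfBlocks_alt (n : Int) : Int :=
  if n ≤ 0 then 0
  else
    ((PySem.List.pyRange 1 (PySem.Int.floordiv (n * (n + 1)) 2 + 1) 1).foldl
      sumOfBlocksStep (0, 1, 1, 1)).1

-- ===== PRECONDITION & SPEC =====
def Spec_sumOfBlocks (n : Int) (out : Int) : Prop := out = sumOfBlocks_alt n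
instance (n : Int) (out : Int) : Decidable (Spec_sumOfBlocks n out) := by unfold Spec_sumOfBlocks; infer_instance

-- ===== CLAIM (what is proved, stated in full; the proofs are below) =====
def Claim_equal_sumOfBlocks : Prop := ∀ (n : Int), Dom_sumOfBlocks n → Spec_sumOfBlocks n (sumOfBlocks n)

-- ===== LEMMAS AND PROOFS =====

-- running block product of r consecutive integers starting at val, seeded by x
def pvF (x val : Int) (r : Nat) : Int :=
  match r with
  | 0 => x
  | r + 1 => pvF (PySem.Int.mod (x * val) 1000000007) (val + 1) r

-- common block-by-block description: process cnt blocks, current start k, current size s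
def pvRun (ans k : Int) (s cnt : Nat) : Int :=
  match cnt with
  | 0 => ans
  | cnt + 1 => pvRun (PySem.Int.mod (ans + pvF 1 k s) 1000000007) (k + s) (s + 1) cnt

-- number of integers consumed by cnt blocks of sizes s, s+1, …
def pvChunk (s cnt : Nat) : Nat :=
  match cnt with
  | 0 => 0
  | cnt + 1 => s + pvChunk (s + 1) cnt

-- A's inner loop is pvF
theorem pvInner (r : Nat) (x val : Int) :
    (PySem.List.pyRange val (val + r) 1).foldl
      (fun x j => PySem.Int.mod (x * j) 1000000007) x = pvF x val r := by
  induction r generalizing x val with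
  | zero => simp [PySem.List.pyRange_one_eq_nil, pvF]
  | succ r ih =>
    rw [PySem.List.pyRange_one_cons (by push_cast; omega)]
    simp only [List.foldl_cons, pvF]
    rw [← ih (PySem.Int.mod (x * val) 1000000007) (val + 1)]
    congr 1
    push_cast; ring

-- A's outer loop is pvRun
theorem pvAFold (cnt : Nat) (s : Nat) (ans k : Int) :
    ((PySem.List.pyRange (s : Int) ((s : Int) + cnt) 1).foldl
      (fun (st : Int × Int) i =>
        let x := (PySem.List.pyRange st.2 (st.2 + i) 1).foldl
          (fun x j => PySem.Int.mod (x * j) 1000000007) 1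
        (PySem.Int.mod (st.1 + x) 1000000007, st.2 + i))
      (ans, k)).1 = pvRun ans k s cnt := by
  induction cnt generalizing s ans k with
  | zero => simp [PySem.List.pyRange_one_eq_nil, pvRun]
  | succ cnt ih =>
    rw [PySem.List.pyRange_one_cons (by push_cast; omega)]
    simp only [List.foldl_cons]
    rw [pvInner s 1 k]
    simp only [pvRun]
    have e1 : (s : Int) + 1 = ((s + 1 : Nat) : Int) := by push_cast; omega
    have e2 : (s : Int) + ((cnt + 1 : Nat) : Int) = ((s + 1 : Nat) : Int) + (cnt : Int) := by
      push_cast; omega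
    rw [e2, e1]
    exact ih (s + 1) (PySem.Int.mod (ans + pvF 1 k s) 1000000007) (k + s)

theorem pvA_eq_run (n : Int) : sumOfBlocks n = pvRun 0 1 1 n.toNat := by
  unfold sumOfBlocks
  by_cases h : 0 ≤ n
  · have : (n + 1 : Int) = ((1 : Nat) : Int) + (n.toNat : Int) := by omega
    rw [this]
    exact pvAFold n.toNat 1 0 1
  · rw [PySem.List.pyRange_one_eq_nil (by omega)]
    have : n.toNat = 0 := by omega
    simp [this, pvRun]

-- one whole block of B's flat loop: r+1 consecutive values, countdown r+1 → block closes
theorem pvBBlock (r : Nat) (ans x val size : Int) :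
    (PySem.List.pyRange val (val + ((r + 1 : Nat) : Int)) 1).foldl
      sumOfBlocksStep (ans, x, size, ((r + 1 : Nat) : Int)) =
    (PySem.Int.mod (ans + pvF x val (r + 1)) 1000000007, 1, size + 1, size + 1) := by
  induction r generalizing ans x val with
  | zero =>
    rw [PySem.List.pyRange_one_cons (by push_cast; omega)]
    rw [PySem.List.pyRange_one_eq_nil (by push_cast; omega)]
    simp [sumOfBlocksStep, pvF]
  | succ r ih =>
    rw [PySem.List.pyRange_one_cons (by push_cast; omega)]
    simp only [List.foldl_cons]
    have hstep : sumOfBlocksStep (ans, x, size, ((r + 1 + 1 : Nat) : Int)) val =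
        (ans, PySem.Int.mod (x * val) 1000000007, size, ((r + 1 : Nat) : Int)) := by
      unfold sumOfBlocksStep
      rw [if_neg (by push_cast; omega)]
      simp only [Prod.mk.injEq]
      exact ⟨trivial, trivial, trivial, by push_cast; omega⟩
    rw [hstep]
    have eb : val + ((r + 1 + 1 : Nat) : Int) = (val + 1) + ((r + 1 : Nat) : Int) := by
      push_cast; ring
    rw [eb, ih]
    simp [pvF]

-- B's flat loop over pvChunk (s+1) cnt values, started at a fresh block, is pvRun
theorem pvBFold (cnt : Nat) (s : Nat) (ans val : Int) :
    ((PySem.List.pyRange val (val + ((pvChunk (s + 1) cnt : Nat) : Int)) 1).foldl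
      sumOfBlocksStep (ans, 1, ((s + 1 : Nat) : Int), ((s + 1 : Nat) : Int))).1 =
    pvRun ans val (s + 1) cnt := by
  induction cnt generalizing s ans val with
  | zero => simp [pvChunk, PySem.List.pyRange_one_eq_nil, pvRun]
  | succ cnt ih =>
    have hsplit := PySem.List.pyRange_one_append val (val + ((s + 1 : Nat) : Int))
      (val + ((pvChunk (s + 1) (cnt + 1) : Nat) : Int))
      (by push_cast; omega) (by simp only [pvChunk]; push_cast; omega)
    rw [hsplit, List.foldl_append]
    rw [pvBBlock s ans 1 val ((s + 1 : Nat) : Int)]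
    have e2 : val + ((pvChunk (s + 1) (cnt + 1) : Nat) : Int) =
        (val + ((s + 1 : Nat) : Int)) + ((pvChunk (s + 1 + 1) cnt : Nat) : Int) := by
      simp only [pvChunk]; push_cast; ring
    have e3 : (((s + 1 : Nat) : Int) + 1) = ((s + 1 + 1 : Nat) : Int) := by push_cast; omega
    rw [e2, e3, ih (s + 1) (PySem.Int.mod (ans + pvF 1 val (s + 1)) 1000000007)
      (val + ((s + 1 : Nat) : Int))]
    simp only [pvRun]

-- the triangular total: n*(n+1)//2 integers make up the first n blocks
theorem pvChunk_tri (m : Nat) : 2 * pvChunk 1 m = m * (m + 1) := by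
  have key : ∀ (c s : Nat), 2 * pvChunk (s + 1) c = c * (2 * s + c + 1) := by
    intro c
    induction c with
    | zero => intro s; simp [pvChunk]
    | succ c ih =>
      intro s
      simp only [pvChunk, Nat.mul_add]
      rw [ih (s + 1)]
      ring
  simpa using key m 0

theorem pvB_eq_run (n : Int) : sumOfBlocks_alt n = pvRun 0 1 1 n.toNat := by
  unfold sumOfBlocks_alt
  by_cases h : n ≤ 0
  · rw [if_pos h]
    have : n.toNat = 0 := by omega
    simp [this, pvRun]
  · rw [if_neg h]
    have hfd : PySem.Int.floordiv (n * (n + 1)) 2 = ((pvChunk 1 n.toNat : Nat) : Int) := by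
      rw [PySem.Int.floordiv_eq_ediv_of_pos (by omega)]
      have h2 : (n * (n + 1) : Int) = 2 * ((pvChunk 1 n.toNat : Nat) : Int) := by
        have := pvChunk_tri n.toNat
        have hn : ((n.toNat : Nat) : Int) = n := by omega
        calc (n * (n + 1) : Int) = ((n.toNat : Nat) : Int) * (((n.toNat : Nat) : Int) + 1) := by
              rw [hn]
          _ = ((n.toNat * (n.toNat + 1) : Nat) : Int) := by push_cast; ring
          _ = ((2 * pvChunk 1 n.toNat : Nat) : Int) := by rw [← this]
          _ = 2 * ((pvChunk 1 n.toNat : Nat) : Int) := by push_cast; ring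
      rw [h2, Int.mul_ediv_cancel_left _ (by norm_num)]
    rw [hfd]
    have e : ((pvChunk 1 n.toNat : Nat) : Int) + 1 = 1 + ((pvChunk (0 + 1) n.toNat : Nat) : Int) := by
      push_cast; ring
    rw [e]
    have hb := pvBFold n.toNat 0 0 1
    simp only [Nat.zero_add, Nat.cast_one] at hb ⊢
    exact hb

-- ===== VERDICT (by name: the statement is the Claim_ definition above) =====
theorem sumOfBlocks_spec : Claim_equal_sumOfBlocks := by
  intro n _
  show sumOfBlocks n = sumOfBlocks_alt n
  rw [pvA_eq_run, pvB_eq_run]
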